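-- pv_equiv track=rewrite | github.com/xtrasmal/sqlit | sqlit/domains/query/app/multi_statement.py | _split_by_semicolons
-- ===== SOURCE A (Python) =====
-- from typing import TYPE_CHECKING, Any, Iterator
--
-- def _iter_sql_chars(sql: str) -> Iterator[tuple[int, str, bool]]:
--     """Iterate through SQL characters, tracking string literal context.
--
--     Handles escape sequences (backslash) and SQL-style doubled quotes.
--
--     Yields:
--         (index, char, outside_string) tuples where outside_string is True
--         when the character is not inside a string literal.
--     """
--     in_single_quote = False
--     in_double_quote = False
--     i = 0
--
--     while i < len(sql):
--         char = sql[i]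
--
--         # Handle escape sequences in strings
--         if i + 1 < len(sql) and char == "\\" and (in_single_quote or in_double_quote):
--             yield (i, char, False)
--             yield (i + 1, sql[i + 1], False)
--             i += 2
--             continue
--
--         # Handle doubled quotes (SQL escape for quotes)
--         if char == "'" and i + 1 < len(sql) and sql[i + 1] == "'" and in_single_quote:
--             yield (i, "'", False)
--             yield (i + 1, "'", False)
--             i += 2
--             continue
--         if char == '"' and i + 1 < len(sql) and sql[i + 1] == '"' and in_double_quote:
--             yield (i, '"', False)
--             yield (i + 1, '"', False)
--             i += 2
--             continue
--
--         # Toggle quote state and yield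
--         if char == "'" and not in_double_quote:
--             in_single_quote = not in_single_quote
--             yield (i, char, False)  # Quote char is part of string syntax
--         elif char == '"' and not in_single_quote:
--             in_double_quote = not in_double_quote
--             yield (i, char, False)  # Quote char is part of string syntax
--         else:
--             yield (i, char, not in_single_quote and not in_double_quote)
--
--         i += 1
--
-- def _split_by_semicolons(sql: str) -> list[str]:
--     """Split SQL by semicolons, respecting string literals."""
--     statements = []
--     current: list[str] = []
--
--     for _, char, outside in _iter_sql_chars(sql):
--         if char == ";" and outside:
--             stmt = "".join(current).strip()
--             if stmt:
--                 statements.append(stmt)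
--             current = []
--         else:
--             current.append(char)
--
--     # Don't forget the last statement (may not end with semicolon)
--     stmt = "".join(current).strip()
--     if stmt:
--         statements.append(stmt)
--
--     return statements
-- ===== SOURCE B (Python) =====
-- def _split_by_semicolons(sql: str) -> list[str]:
--     """Split SQL by semicolons, respecting string literals.
--
--     One forward pass over the characters (no index lookahead): escapes and
--     SQL doubled quotes are handled with a one-character deferred-decision
--     state (skip / pending quote) instead of peeking at sql[i + 1].
--     """
--     statements: list[str] = []
--     current: list[str] = []
--     in_s = in_d = False
--     skip = False
--     pending = ""  # a quote char seen inside its own string, not yet resolved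
--
--     for c in sql:
--         if skip:  # character escaped by a backslash
--             current.append(c)
--             skip = False
--             continue
--         if pending:
--             q, pending = pending, ""
--             if c == q:  # doubled quote: literal quote, string continues
--                 current.append(c)
--                 continue
--             # the pending quote actually closed the string
--             if q == "'":
--                 in_s = False
--             else:
--                 in_d = False
--         if (in_s or in_d) and c == "\\":
--             current.append(c)
--             skip = True
--         elif in_s and c == "'":
--             current.append(c)
--             pending = "'"
--         elif in_d and c == '"':
--             current.append(c)
--             pending = '"'
--         elif c == "'" and not in_d:
--             in_s = True
--             current.append(c)
--         elif c == '"' and not in_s: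
--             in_d = True
--             current.append(c)
--         elif c == ";" and not in_s and not in_d:
--             stmt = "".join(current).strip()
--             if stmt:
--                 statements.append(stmt)
--             current = []
--         else:
--             current.append(c)
--
--     stmt = "".join(current).strip()
--     if stmt:
--         statements.append(stmt)
--     return statements
-- ===== Notes on version B (the rewrite author's own statement) =====
-- stated objective: simpler
-- what changed: A drives a separate lookahead generator that yields (index, char, outside) tuples and peeks at sql[i+1] to handle backslash escapes and doubled quotes; B is one self-contained forward pass over the characters with no index arithmetic, deferring each decision to the next character via a skip flag (after a backslash) and a pending-quote state (quote seen inside its own string: doubled if the next char repeats it, otherwise the string closed).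
import Mathlib
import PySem

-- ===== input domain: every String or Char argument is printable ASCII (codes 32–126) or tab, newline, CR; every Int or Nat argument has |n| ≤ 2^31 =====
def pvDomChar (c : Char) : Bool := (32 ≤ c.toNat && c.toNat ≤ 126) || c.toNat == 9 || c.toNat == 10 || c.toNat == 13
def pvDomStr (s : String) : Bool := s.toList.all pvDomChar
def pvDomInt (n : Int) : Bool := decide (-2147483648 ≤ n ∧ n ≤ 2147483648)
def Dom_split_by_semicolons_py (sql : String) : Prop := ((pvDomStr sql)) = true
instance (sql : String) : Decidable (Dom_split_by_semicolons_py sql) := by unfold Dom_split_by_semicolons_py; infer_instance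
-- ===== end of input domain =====

-- B replaces A's lookahead generator (_iter_sql_chars peeking at sql[i+1]) by a single
-- forward pass with a one-character deferred-decision state (skip / pending quote): simpler, no indices.

-- ===== PORT A =====
-- port of _iter_sql_chars: list of (index, char, outside_string); lookahead 'i+1 < len'
-- becomes pattern matching on one vs at-least-two remaining characters.
def iterSqlChars : List Char → Int → Bool → Bool → List (Int × Char × Bool)
  | [], _, _, _ => []
  | [c], i, s, d =>
      if c == '\'' && !d then [(i, c, false)]
      else if c == '"' && !s then [(i, c, false)]
      else [(i, c, !s && !d)]
  | c :: c2 :: rest, i, s, d =>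
      if c == '\\' && (s || d) then
        (i, c, false) :: (i + 1, c2, false) :: iterSqlChars rest (i + 2) s d
      else if c == '\'' && c2 == '\'' && s then
        (i, '\'', false) :: (i + 1, '\'', false) :: iterSqlChars rest (i + 2) s d
      else if c == '"' && c2 == '"' && d then
        (i, '"', false) :: (i + 1, '"', false) :: iterSqlChars rest (i + 2) s d
      else if c == '\'' && !d then
        (i, c, false) :: iterSqlChars (c2 :: rest) (i + 1) (!s) d
      else if c == '"' && !s then
        (i, c, false) :: iterSqlChars (c2 :: rest) (i + 1) s (!d)
      else
        (i, c, !s && !d) :: iterSqlChars (c2 :: rest) (i + 1) s d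

-- the body of A's for-loop over the generator
def consumeStep (acc : List String × List Char) (t : Int × Char × Bool) : List String × List Char :=
  if t.2.1 == ';' && t.2.2 then
    let stmt := PySem.Str.strip (String.mk acc.2)
    (if stmt ≠ "" then acc.1 ++ [stmt] else acc.1, [])
  else (acc.1, acc.2 ++ [t.2.1])

def split_by_semicolons_py (sql : String) : List String :=
  let r := (iterSqlChars sql.toList 0 false false).foldl consumeStep ([], [])
  let stmt := PySem.Str.strip (String.mk r.2)
  if stmt ≠ "" then r.1 ++ [stmt] else r.1

-- ===== PORT B =====
structure SplitSt where
  stmts : List String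
  cur : List Char
  inS : Bool
  inD : Bool
  skip : Bool
  pending : Option Char
deriving Repr, DecidableEq

-- the part of B's loop body after skip/pending have been resolved
def altCore (st : SplitSt) (c : Char) : SplitSt :=
  if (st.inS || st.inD) && c == '\\' then { st with cur := st.cur ++ [c], skip := true }
  else if st.inS && c == '\'' then { st with cur := st.cur ++ [c], pending := some '\'' }
  else if st.inD && c == '"' then { st with cur := st.cur ++ [c], pending := some '"' }
  else if c == '\'' && !st.inD then { st with inS := true, cur := st.cur ++ [c] }
  else if c == '"' && !st.inS then { st with inD := true, cur := st.cur ++ [c] }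
  else if c == ';' && !st.inS && !st.inD then
    let stmt := PySem.Str.strip (String.mk st.cur)
    { st with stmts := if stmt ≠ "" then st.stmts ++ [stmt] else st.stmts, cur := [] }
  else { st with cur := st.cur ++ [c] }

def altStep (st : SplitSt) (c : Char) : SplitSt :=
  if st.skip then { st with cur := st.cur ++ [c], skip := false }
  else
    match st.pending with
    | some q =>
        if c == q then { st with cur := st.cur ++ [c], pending := none }
        else
          altCore { st with pending := none,
                            inS := if q == '\'' then false else st.inS,
                            inD := if q == '\'' then st.inD else false } c
    | none => altCore st c

def split_by_semicolons_py_alt (sql : String) : List String :=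
  let r := sql.toList.foldl altStep ⟨[], [], false, false, false, none⟩
  let stmt := PySem.Str.strip (String.mk r.cur)
  if stmt ≠ "" then r.stmts ++ [stmt] else r.stmts

-- ===== PRECONDITION & SPEC =====
def Spec_split_by_semicolons_py (sql : String) (out : List String) : Prop := out = split_by_semicolons_py_alt sql
instance (sql : String) (out : List String) : Decidable (Spec_split_by_semicolons_py sql out) := by unfold Spec_split_by_semicolons_py; infer_instance

-- ===== CLAIM (what is proved, stated in full; the proofs are below) =====
def Claim_equal_split_by_semicolons_py : Prop := ∀ (sql : String), Dom_split_by_semicolons_py sql → Spec_split_by_semicolons_py sql (split_by_semicolons_py sql)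

-- ===== LEMMAS AND PROOFS =====

def finishA (p : List String × List Char) : List String :=
  let stmt := PySem.Str.strip (String.mk p.2)
  if stmt ≠ "" then p.1 ++ [stmt] else p.1

def finishB (st : SplitSt) : List String :=
  let stmt := PySem.Str.strip (String.mk st.cur)
  if stmt ≠ "" then st.stmts ++ [stmt] else st.stmts

theorem finishB_mk (a : List String) (b : List Char) (s d k : Bool) (p : Option Char) :
    finishB ⟨a, b, s, d, k, p⟩ = finishA (a, b) := rfl


set_option maxHeartbeats 1600000 in
theorem key : ∀ (n : Nat) (l : List Char), l.length ≤ n →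
    ∀ (i : Int) (s d : Bool) (stmts : List String) (cur : List Char), (s && d) = false →
      finishA ((iterSqlChars l i s d).foldl consumeStep (stmts, cur)) =
      finishB (l.foldl altStep ⟨stmts, cur, s, d, false, none⟩) := by
  intro n
  induction n with
  | zero =>
      intro l hl i s d stmts cur hsd
      have hnil : l = [] := by cases l <;> simp_all
      subst hnil
      simp [iterSqlChars, finishB_mk]
  | succ n ih =>
      intro l hl i s d stmts cur hsd
      rcases l with _ | ⟨c, l'⟩
      · simp [iterSqlChars, finishB_mk]
      rcases l' with _ | ⟨c2, rest⟩
      · -- single remaining character: both sides append it, unless it is a cutting ';'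
        by_cases hq : c = '\''
        · subst hq
          cases d <;> cases s <;>
            simp_all [iterSqlChars, List.foldl, consumeStep, altStep, altCore, finishB_mk]
        by_cases hqq : c = '"'
        · subst hqq
          cases d <;> cases s <;>
            simp_all [iterSqlChars, List.foldl, consumeStep, altStep, altCore, finishB_mk]
        by_cases hbs : c = '\\'
        · subst hbs
          cases d <;> cases s <;>
            simp_all [iterSqlChars, List.foldl, consumeStep, altStep, altCore, finishB_mk]
        by_cases hsc : c = ';'
        · subst hsc
          cases d <;> cases s <;>
            simp_all [iterSqlChars, List.foldl, consumeStep, altStep, altCore, finishB_mk]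
        · simp [iterSqlChars, List.foldl, consumeStep, altStep, altCore, finishA, finishB,
                hq, hqq, hbs, hsc]
      -- at least two remaining characters (the lookahead i+1 < len is available)
      have hr : rest.length ≤ n := by simp at hl; omega
      have hcr : (c2 :: rest).length ≤ n := by simp at hl ⊢; omega
      by_cases h1 : c = '\\' ∧ (s || d) = true
      · -- backslash escape inside a string: A consumes two chars; B sets skip
        obtain ⟨hc, hor⟩ := h1
        subst hc
        simpa [iterSqlChars, hor, List.foldl, consumeStep, altStep, altCore]
          using ih rest hr (i + 2) s d stmts (cur ++ ['\\', c2]) hsd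
      by_cases h2 : c = '\'' ∧ c2 = '\'' ∧ s = true
      · -- doubled single quote inside a single-quoted string
        obtain ⟨hc, hc2, hs⟩ := h2
        subst hc; subst hc2; subst hs
        have hd : d = false := by simpa using hsd
        subst hd
        simpa [iterSqlChars, List.foldl, consumeStep, altStep, altCore]
          using ih rest hr (i + 2) true false stmts (cur ++ ['\'', '\'']) rfl
      by_cases h3 : c = '"' ∧ c2 = '"' ∧ d = true
      · -- doubled double quote inside a double-quoted string
        obtain ⟨hc, hc2, hd⟩ := h3
        subst hc; subst hc2; subst hd
        have hs : s = false := by simpa using hsd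
        subst hs
        simpa [iterSqlChars, List.foldl, consumeStep, altStep, altCore]
          using ih rest hr (i + 2) false true stmts (cur ++ ['"', '"']) rfl
      by_cases h4 : c = '\''
      · subst h4
        cases d with
        | true =>
            -- a single quote inside a double-quoted string: plain character
            have hs : s = false := by simpa using hsd
            subst hs
            simpa [iterSqlChars, List.foldl, consumeStep, altStep, altCore]
              using ih (c2 :: rest) hcr (i + 1) false true stmts (cur ++ ['\'']) rfl
        | false =>
            cases s with
            | false =>
                -- opening single quote
                simpa [iterSqlChars, List.foldl, consumeStep, altStep, altCore]
                  using ih (c2 :: rest) hcr (i + 1) true false stmts (cur ++ ['\'']) rfl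
            | true =>
                -- quote while in a single-quoted string, next char not a quote:
                -- A closes now; B defers the decision (pending) and resolves it on c2
                have hne : ¬ c2 = '\'' := fun h => h2 ⟨rfl, h, rfl⟩
                simpa [iterSqlChars, List.foldl, consumeStep, altStep, altCore, hne]
                  using ih (c2 :: rest) hcr (i + 1) false false stmts (cur ++ ['\'']) rfl
      by_cases h5 : c = '"'
      · subst h5
        cases s with
        | true =>
            have hd : d = false := by simpa using hsd
            subst hd
            simpa [iterSqlChars, List.foldl, consumeStep, altStep, altCore]
              using ih (c2 :: rest) hcr (i + 1) true false stmts (cur ++ ['"']) rfl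
        | false =>
            cases d with
            | false =>
                simpa [iterSqlChars, List.foldl, consumeStep, altStep, altCore]
                  using ih (c2 :: rest) hcr (i + 1) false true stmts (cur ++ ['"']) rfl
            | true =>
                have hne : ¬ c2 = '"' := fun h => h3 ⟨rfl, h, rfl⟩
                simpa [iterSqlChars, List.foldl, consumeStep, altStep, altCore, hne]
                  using ih (c2 :: rest) hcr (i + 1) false false stmts (cur ++ ['"']) rfl
      -- remaining characters: appended by both, except a cutting ';' outside strings
      by_cases hbs : c = '\\'
      · subst hbs
        have hor : (s || d) = false := by
          cases hsor : (s || d) <;> simp_all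
        simpa [iterSqlChars, hor, List.foldl, consumeStep, altStep, altCore, h4, h5]
          using ih (c2 :: rest) hcr (i + 1) s d stmts (cur ++ ['\\']) hsd
      by_cases hsc : c = ';'
      · subst hsc
        cases s with
        | true =>
            simpa [iterSqlChars, List.foldl, consumeStep, altStep, altCore]
              using ih (c2 :: rest) hcr (i + 1) true d stmts (cur ++ [';']) hsd
        | false =>
            cases d with
            | true =>
                simpa [iterSqlChars, List.foldl, consumeStep, altStep, altCore]
                  using ih (c2 :: rest) hcr (i + 1) false true stmts (cur ++ [';']) rfl
            | false =>
                simpa [iterSqlChars, List.foldl, consumeStep, altStep, altCore]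
                  using ih (c2 :: rest) hcr (i + 1) false false
                    (if PySem.Str.strip (String.mk cur) ≠ "" then
                        stmts ++ [PySem.Str.strip (String.mk cur)] else stmts) [] rfl
      · simpa [iterSqlChars, List.foldl, consumeStep, altStep, altCore, h4, h5, hbs, hsc]
          using ih (c2 :: rest) hcr (i + 1) s d stmts (cur ++ [c]) hsd

-- ===== VERDICT (by name: the statement is the Claim_ definition above) =====
theorem split_by_semicolons_py_spec : Claim_equal_split_by_semicolons_py := by
  intro sql _
  unfold Spec_split_by_semicolons_py split_by_semicolons_py split_by_semicolons_py_alt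
  have h := key sql.toList.length sql.toList (Nat.le_refl _) 0 false false [] [] rfl
  simpa [finishA, finishB] using h
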